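-- pv_equiv track=rewrite | github.com/morgornis/algorithms | sort.py | feed_animals
-- ===== SOURCE A (Python) =====
-- def feed_animals(animals, food):
--     if len(animals) == 0 or len(food) == 0:
--         return 0
--
--     animals.sort()  # Сортируем животных
--     food.sort()     # Сортируем еду
--
--     count = 0
--     for f in food:
--         if f >= animals[count]:
--             count += 1
--
--         if count == len(animals):
--             break
--
--     return count
-- ===== SOURCE B (Python) =====
-- def feed_animals(animals, food):
--     animals.sort()
--     food.sort()
--     n, m = len(animals), len(food)
--
--     def feasible(k):
--         # can the k smallest animals be fed by the k largest foods?
--         return all(animals[i] <= food[m - k + i] for i in range(k))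
--
--     lo, hi = 0, min(n, m)
--     while lo < hi:
--         mid = (lo + hi + 1) // 2
--         if feasible(mid):
--             lo = mid
--         else:
--             hi = mid - 1
--     return lo
-- ===== Notes on version B (the rewrite author's own statement) =====
-- stated objective: alternative
-- what changed: A streams the sorted food list once through a greedy counter; B instead binary-searches for the largest k such that the k smallest animals fit pairwise under the k largest foods, checking feasibility of each candidate k directly.
import Mathlib
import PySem

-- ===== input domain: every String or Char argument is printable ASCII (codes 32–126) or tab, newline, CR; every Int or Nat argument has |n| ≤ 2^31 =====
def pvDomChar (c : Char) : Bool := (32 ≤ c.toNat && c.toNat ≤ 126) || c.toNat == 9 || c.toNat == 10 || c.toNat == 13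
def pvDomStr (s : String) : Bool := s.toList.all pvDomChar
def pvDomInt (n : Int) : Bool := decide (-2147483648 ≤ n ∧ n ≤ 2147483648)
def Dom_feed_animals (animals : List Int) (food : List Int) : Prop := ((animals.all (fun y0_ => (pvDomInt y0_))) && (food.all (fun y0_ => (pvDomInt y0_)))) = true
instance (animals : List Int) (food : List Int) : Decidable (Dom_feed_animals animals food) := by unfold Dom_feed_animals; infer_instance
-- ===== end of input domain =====

-- B replaces A's streaming greedy by a binary search for the largest k such that the k
-- smallest animals fit pairwise under the k largest foods (objective: alternative algorithm).
-- Both Pythons sort their argument lists in place; the equivalence proved here is about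
-- the return value (B performs the same in-place sorts as A).

-- ===== PORT A =====
-- the for-f-in-food loop of A, carrying count; the break makes 'animals[count]'
-- always in range in Python, so the 'none' branch (IndexError) is unreachable
def feedLoopA (sa : List Int) : List Int → Int → Int
  | [], count => count
  | f :: rest, count =>
    match PySem.List.pyGet? sa count with
    | none => count   -- Python IndexError; unreachable because of the break
    | some a =>
      let c := if a ≤ f then count + 1 else count
      if c = (sa.length : Int) then c else feedLoopA sa rest c

def feed_animals (animals : List Int) (food : List Int) : Int :=
  if animals.length = 0 ∨ food.length = 0 then 0
  else
    let sa := PySem.List.sorted animals (fun x => x) false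
    let sf := PySem.List.sorted food (fun x => x) false
    feedLoopA sa sf 0

-- ===== PORT B =====
-- feasible(k): all(animals[i] <= food[m - k + i] for i in range(k)); the generator's
-- indices are in range whenever k ≤ min(n, m), so getD is exact there
def feasB (sa sf : List Int) (k : Nat) : Bool :=
  (List.range k).all (fun i => decide (sa.getD i 0 ≤ sf.getD (sf.length - k + i) 0))

-- the 'while lo < hi' binary-search loop of B; 'fuel' only bounds the iteration count
-- (hi - lo shrinks every round, so fuel = initial hi suffices and is never exhausted)
def bsearchB (sa sf : List Int) : Nat → Nat → Nat → Nat
  | 0, lo, _ => lo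
  | fuel + 1, lo, hi =>
    if lo < hi then
      let mid := (lo + hi + 1) / 2
      if feasB sa sf mid then bsearchB sa sf fuel mid hi else bsearchB sa sf fuel lo (mid - 1)
    else lo

def feed_animals_alt (animals : List Int) (food : List Int) : Int :=
  let sa := PySem.List.sorted animals (fun x => x) false
  let sf := PySem.List.sorted food (fun x => x) false
  ((bsearchB sa sf (min sa.length sf.length) 0 (min sa.length sf.length) : Nat) : Int)

-- ===== PRECONDITION & SPEC =====
def Spec_feed_animals (animals : List Int) (food : List Int) (out : Int) : Prop := out = feed_animals_alt animals food
instance (animals : List Int) (food : List Int) (out : Int) : Decidable (Spec_feed_animals animals food out) := by unfold Spec_feed_animals; infer_instance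

-- ===== CLAIM =====
def Claim_equal_feed_animals : Prop := ∀ (animals : List Int) (food : List Int), Dom_feed_animals animals food → Spec_feed_animals animals food (feed_animals animals food)

-- ===== LEMMAS AND PROOFS =====

-- the pure greedy count both sides are compared through
def Gn : List Int → List Int → Nat
  | _, [] => 0
  | [], _ :: _ => 0
  | a :: as, f :: fs => if a ≤ f then Gn as fs + 1 else Gn (a :: as) fs

-- Feas sa sf k: the k smallest animals fit pairwise under the k largest foods
def Feas (sa sf : List Int) (k : Nat) : Prop :=
  ∀ i < k, sa.getD i 0 ≤ sf.getD (sf.length - k + i) 0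

lemma feasB_iff (sa sf : List Int) (k : Nat) : feasB sa sf k = true ↔ Feas sa sf k := by
  simp [feasB, Feas, List.all_eq_true, List.mem_range]

lemma Gn_nil_food (l : List Int) : Gn l [] = 0 := by cases l <;> simp [Gn]

lemma Gn_nil_animals (l : List Int) : Gn [] l = 0 := by cases l <;> simp [Gn]

-- A's loop equals count + Gn on the remaining animals (adapted loop bridge)
lemma bridgeA (fs : List Int) : ∀ (sa : List Int) (count : Int), 0 ≤ count →
    feedLoopA sa fs count = count + ((Gn (sa.drop count.toNat) fs : Nat) : Int) := by
  induction fs with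
  | nil => intro sa count _; simp [feedLoopA, Gn_nil_food]
  | cons f rest ih =>
    intro sa count hc
    by_cases hlt : count.toNat < sa.length
    · have hget : PySem.List.pyGet? sa count = some sa[count.toNat] := by
        rw [PySem.List.pyGet?_of_nonneg sa hc, List.getElem?_eq_getElem hlt]
      have hdrop : sa.drop count.toNat = sa[count.toNat] :: sa.drop (count.toNat + 1) :=
        List.drop_eq_getElem_cons hlt
      by_cases hcf : sa[count.toNat] ≤ f
      · have hG : Gn (sa.drop count.toNat) (f :: rest)
            = Gn (sa.drop (count.toNat + 1)) rest + 1 := by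
          rw [hdrop]; rw [Gn]; simp [hcf]
        by_cases hbrk : count + 1 = (sa.length : Int)
        · have hnil : sa.drop (count.toNat + 1) = [] := List.drop_eq_nil_of_le (by omega)
          simp only [feedLoopA, hget, if_pos hcf, if_pos hbrk, hG, hnil]
          simp [Gn_nil_animals]
        · have hdrop' : sa.drop (count + 1).toNat = sa.drop (count.toNat + 1) := by
            congr 1; omega
          simp only [feedLoopA, hget]
          simp only [if_pos hcf, if_neg hbrk]
          rw [ih sa (count + 1) (by omega), hdrop', hG]
          push_cast; ring
      · have hfa : f < sa[count.toNat] := lt_of_not_ge hcf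
        have hbrk : ¬ (count = (sa.length : Int)) := by omega
        have hG : Gn (sa.drop count.toNat) (f :: rest) = Gn (sa.drop count.toNat) rest := by
          rw [hdrop]; rw [Gn]; rw [if_neg (not_le.mpr hfa), ← hdrop]
        simp [feedLoopA, hget, hcf, hbrk, hG, ih sa count hc]
    · have hget : PySem.List.pyGet? sa count = none := by
        rw [PySem.List.pyGet?_eq_none_iff]
        simp [PySem.Raise.InRange]; omega
      have hdrop : sa.drop count.toNat = [] := List.drop_eq_nil_of_le (by omega)
      simp [feedLoopA, hget, hdrop, Gn]

-- head of a sorted list bounds every getD within range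
lemma head_le_getD (f : Int) (fs : List Int) (hs : (f :: fs).Pairwise (· ≤ ·))
    (j : Nat) (hj : j ≤ fs.length) : f ≤ (f :: fs).getD j 0 := by
  cases j with
  | zero => simp
  | succ j' =>
    have hj' : j' < fs.length := by omega
    rw [List.getD_cons_succ, List.getD_eq_getElem _ _ hj']
    exact (List.pairwise_cons.mp hs).1 _ (List.getElem_mem hj')

-- getD is monotone on a sorted list (within range)
lemma getD_mono (sf : List Int) (hs : sf.Pairwise (· ≤ ·)) (p q : Nat)
    (hpq : p ≤ q) (hq : q < sf.length) : sf.getD p 0 ≤ sf.getD q 0 := by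
  rcases eq_or_lt_of_le hpq with h | h
  · subst h; exact le_refl _
  · rw [List.getD_eq_getElem _ _ (by omega), List.getD_eq_getElem _ _ hq]
    exact List.pairwise_iff_getElem.mp hs p q (by omega) hq h

-- Feas is downward monotone in k on a sorted food list
lemma feas_step_down (sa sf : List Int) (hs : sf.Pairwise (· ≤ ·)) (k : Nat)
    (hk : k + 1 ≤ sf.length) (h : Feas sa sf (k + 1)) : Feas sa sf k := by
  intro i hi
  have h1 := h i (by omega)
  have h2 : sf.getD (sf.length - (k + 1) + i) 0 ≤ sf.getD (sf.length - k + i) 0 :=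
    getD_mono sf hs _ _ (by omega) (by omega)
  exact le_trans h1 h2

lemma feas_mono (sa sf : List Int) (hs : sf.Pairwise (· ≤ ·)) :
    ∀ k j, j ≤ k → k ≤ sf.length → Feas sa sf k → Feas sa sf j := by
  intro k
  induction k with
  | zero =>
    intro j hj _ h
    have hj0 : j = 0 := Nat.le_zero.mp hj
    subst hj0; exact h
  | succ k' ih =>
    intro j hj hk h
    rcases Nat.eq_or_lt_of_le hj with rfl | hlt
    · exact h
    · exact ih j (by omega) (by omega) (feas_step_down sa sf hs k' (by omega) h)

-- skipping a food smaller than every needed one does not change feasibility ≤ |fs|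
lemma feas_skip (X : List Int) (f : Int) (fs : List Int) (k : Nat) (hk : k ≤ fs.length) :
    Feas X (f :: fs) k ↔ Feas X fs k := by
  unfold Feas
  constructor <;> intro h i hi <;> have h1 := h i hi <;>
    have heq : (f :: fs).length - k + i = (fs.length - k + i) + 1 := by
      simp only [List.length_cons]; omega
  · rwa [heq, List.getD_cons_succ] at h1
  · rwa [heq, List.getD_cons_succ]

lemma feas_succ_of (a f : Int) (as fs : List Int) (haf : a ≤ f)
    (hs : (f :: fs).Pairwise (· ≤ ·)) (k : Nat) (hk : k ≤ fs.length)
    (h : Feas as fs k) : Feas (a :: as) (f :: fs) (k + 1) := by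
  intro i hi
  have heq : (f :: fs).length - (k + 1) + i = fs.length - k + i := by
    simp only [List.length_cons]; omega
  rw [heq]
  cases i with
  | zero =>
    simp only [List.getD_cons_zero]
    exact le_trans haf (head_le_getD f fs hs _ (by omega))
  | succ i' =>
    have heq2 : fs.length - k + (i' + 1) = (fs.length - k + i') + 1 := by omega
    rw [List.getD_cons_succ, heq2, List.getD_cons_succ]
    exact h i' (by omega)

lemma feas_pred (a f : Int) (as fs : List Int) (k : Nat) (hk : k ≤ fs.length)
    (h : Feas (a :: as) (f :: fs) (k + 1)) : Feas as fs k := by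
  intro i hi
  have h1 := h (i + 1) (by omega)
  have heq : (f :: fs).length - (k + 1) + (i + 1) = (fs.length - k + i) + 1 := by
    simp only [List.length_cons]; omega
  rwa [heq, List.getD_cons_succ, List.getD_cons_succ] at h1

-- Gn is the greatest feasible k (on sorted lists)
lemma Gn_max (fs : List Int) : ∀ (as : List Int), as.Pairwise (· ≤ ·) → fs.Pairwise (· ≤ ·) →
    Gn as fs ≤ min as.length fs.length ∧ Feas as fs (Gn as fs) ∧
      ∀ j, j ≤ min as.length fs.length → Feas as fs j → j ≤ Gn as fs := by
  induction fs with
  | nil =>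
    intro as _ _
    refine ⟨by simp [Gn_nil_food], by intro i hi; simp [Gn_nil_food] at hi, ?_⟩
    intro j hj _; simpa [Gn_nil_food] using hj
  | cons f fs' ih =>
    intro as has hfs
    cases as with
    | nil =>
      refine ⟨by simp [Gn], by intro i hi; simp [Gn] at hi, ?_⟩
      intro j hj _; simpa [Gn] using hj
    | cons a as' =>
      have has' : as'.Pairwise (· ≤ ·) := (List.pairwise_cons.mp has).2
      have hfs' : fs'.Pairwise (· ≤ ·) := (List.pairwise_cons.mp hfs).2
      by_cases hcf : a ≤ f
      · obtain ⟨hle, hfeas, hmax⟩ := ih as' has' hfs'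
        have hG : Gn (a :: as') (f :: fs') = Gn as' fs' + 1 := by simp [Gn, hcf]
        refine ⟨?_, ?_, ?_⟩
        · rw [hG]; simp only [List.length_cons]; omega
        · rw [hG]
          exact feas_succ_of a f as' fs' hcf hfs _ (by omega) hfeas
        · intro j hj hfj
          cases j with
          | zero => omega
          | succ j' =>
            have := hmax j' (by simp only [List.length_cons] at hj; omega)
              (feas_pred a f as' fs' j' (by simp only [List.length_cons] at hj; omega) hfj)
            omega
      · obtain ⟨hle, hfeas, hmax⟩ := ih (a :: as') has hfs'
        have hG : Gn (a :: as') (f :: fs') = Gn (a :: as') fs' := by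
          simp [Gn, hcf]
        refine ⟨?_, ?_, ?_⟩
        · rw [hG]; simp only [List.length_cons] at hle ⊢; omega
        · rw [hG]
          exact (feas_skip (a :: as') f fs' _ (by simp only [List.length_cons] at hle; omega)).mpr hfeas
        · intro j hj hfj
          rw [hG]
          by_cases hjf : j ≤ fs'.length
          · exact hmax j (by simp only [List.length_cons] at hj ⊢; omega)
              ((feas_skip (a :: as') f fs' j hjf).mp hfj)
          · -- j = fs'.length + 1: infeasible since a > f
            exfalso
            have hj' : j = fs'.length + 1 := by
              simp only [List.length_cons] at hj; omega
            have h0 := hfj 0 (by omega)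
            rw [hj'] at h0
            simp at h0
            omega

-- the binary search converges to the greatest feasible k (fuel ≥ hi - lo)
lemma bsearch_eq (sa sf : List Int) (hs : sf.Pairwise (· ≤ ·)) (g : Nat)
    (hfg : Feas sa sf g) (hgm : g ≤ min sa.length sf.length)
    (hmax : ∀ j, j ≤ min sa.length sf.length → Feas sa sf j → j ≤ g) :
    ∀ fuel lo hi, hi - lo ≤ fuel → lo ≤ g → g ≤ hi → hi ≤ min sa.length sf.length →
      bsearchB sa sf fuel lo hi = g := by
  intro fuel
  induction fuel with
  | zero =>
    intro lo hi hd hlo hhi _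
    rw [bsearchB]
    omega
  | succ d' ih =>
    intro lo hi hd hlo hhi hmin
    by_cases hlh : lo < hi
    · rw [bsearchB]
      simp only [if_pos hlh]
      have hmid1 : lo + 1 ≤ (lo + hi + 1) / 2 := by
        rw [Nat.le_div_iff_mul_le (by omega)]; omega
      have hmid2 : (lo + hi + 1) / 2 ≤ hi := by
        have := Nat.div_le_div_right (c := 2) (show lo + hi + 1 ≤ hi * 2 + 1 by omega)
        omega
      by_cases hf : feasB sa sf ((lo + hi + 1) / 2) = true
      · simp only [if_pos hf]
        have hmg : (lo + hi + 1) / 2 ≤ g :=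
          hmax _ (by omega) ((feasB_iff _ _ _).mp hf)
        exact ih _ hi (by omega) hmg hhi hmin
      · simp only [if_neg hf]
        have hgm' : g < (lo + hi + 1) / 2 := by
          by_contra hcon
          exact hf ((feasB_iff _ _ _).mpr
            (feas_mono sa sf hs g _ (by omega) (by omega) hfg))
        exact ih lo _ (by omega) hlo (by omega) (by omega)
    · rw [bsearchB, if_neg hlh]
      omega

-- ===== VERDICT =====
theorem feed_animals_spec : Claim_equal_feed_animals := by
  intro animals food _
  unfold Spec_feed_animals
  have hsa := PySem.List.sorted_pairwise (xs := animals) (key := fun x : Int => x)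
  have hsf := PySem.List.sorted_pairwise (xs := food) (key := fun x : Int => x)
  obtain ⟨hle, hfeas, hmax⟩ :=
    Gn_max (PySem.List.sorted food (fun x => x) false)
      (PySem.List.sorted animals (fun x => x) false) hsa hsf
  have hbs := bsearch_eq (PySem.List.sorted animals (fun x => x) false)
      (PySem.List.sorted food (fun x => x) false) hsf _ hfeas hle hmax
      (min (PySem.List.sorted animals (fun x => x) false).length
        (PySem.List.sorted food (fun x => x) false).length)
      0 (min (PySem.List.sorted animals (fun x => x) false).length
        (PySem.List.sorted food (fun x => x) false).length)
      (by omega) (by omega) hle (le_refl _)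
  have halt : feed_animals_alt animals food
      = ((Gn (PySem.List.sorted animals (fun x => x) false)
            (PySem.List.sorted food (fun x => x) false) : Nat) : Int) := by
    show ((bsearchB (PySem.List.sorted animals (fun x => x) false)
        (PySem.List.sorted food (fun x => x) false)
        (min (PySem.List.sorted animals (fun x => x) false).length
          (PySem.List.sorted food (fun x => x) false).length) 0
        (min (PySem.List.sorted animals (fun x => x) false).length
          (PySem.List.sorted food (fun x => x) false).length) : Nat) : Int) = _
    rw [hbs]
  rw [halt]
  unfold feed_animals
  split
  · rename_i hemp
    have hlen_a : (PySem.List.sorted animals (fun x => x) false).length = animals.length :=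
      PySem.List.length_sorted _ _ _
    have hlen_f : (PySem.List.sorted food (fun x => x) false).length = food.length :=
      PySem.List.length_sorted _ _ _
    have h0 : Gn (PySem.List.sorted animals (fun x => x) false)
        (PySem.List.sorted food (fun x => x) false) = 0 := by
      rcases hemp with h | h <;> omega
    simp [h0]
  · show feedLoopA (PySem.List.sorted animals (fun x => x) false)
        (PySem.List.sorted food (fun x => x) false) 0 = _
    rw [bridgeA _ _ 0 le_rfl]
    simp
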